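-- pv_equiv track=rewrite | github.com/LeYangNwpu/CodeCraft | contest/Google_2018_0826_RoundE/Yogurt.py | max_yogurt
-- ===== SOURCE A (Python) =====
-- def day_pass(value_in):
--     value_out = []
--     for data in value_in:
--         data -= 1
--         if data > 0:
--             value_out.append(data)
--     return value_out
--
-- def max_yogurt(n, k, value_n):
--     cons_num = 0
--     while len(value_n) > 0:
--         num_temp = min(k, len(value_n))
--         cons_num += num_temp
--         # remove drink yogurt
--         value_n = value_n[num_temp:]
--         # decrease time
--         value_n = day_pass(value_n)
--     return cons_num
-- ===== SOURCE B (Python) =====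
-- def max_yogurt(n, k, value_n):
--     # Single pass: day counter and per-day slot count instead of repeatedly
--     # slicing and rebuilding the list. An item reached on day d is still
--     # edible iff d == 0 (nothing has expired yet) or its value exceeds d.
--     if k <= 0:
--         return 0
--     cons = 0
--     day = 0
--     filled = 0
--     for v in value_n:
--         if day == 0 or v > day:
--             cons += 1
--             filled += 1
--             if filled == k:
--                 day += 1
--                 filled = 0
--     return cons
-- ===== Notes on version B (the rewrite author's own statement) =====
-- stated objective: alternative
-- what changed: Replaces the day-by-day simulation (repeated list slicing plus decrement-and-filter rebuilds) by a single left-to-right pass that keeps a day counter and a per-day slot count and eats an item iff it is still unexpired when its slot comes up.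
-- outside the precondition, e.g. on max_yogurt(2, -1, [3, 3]): A returns -3, B returns 0
import Mathlib
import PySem

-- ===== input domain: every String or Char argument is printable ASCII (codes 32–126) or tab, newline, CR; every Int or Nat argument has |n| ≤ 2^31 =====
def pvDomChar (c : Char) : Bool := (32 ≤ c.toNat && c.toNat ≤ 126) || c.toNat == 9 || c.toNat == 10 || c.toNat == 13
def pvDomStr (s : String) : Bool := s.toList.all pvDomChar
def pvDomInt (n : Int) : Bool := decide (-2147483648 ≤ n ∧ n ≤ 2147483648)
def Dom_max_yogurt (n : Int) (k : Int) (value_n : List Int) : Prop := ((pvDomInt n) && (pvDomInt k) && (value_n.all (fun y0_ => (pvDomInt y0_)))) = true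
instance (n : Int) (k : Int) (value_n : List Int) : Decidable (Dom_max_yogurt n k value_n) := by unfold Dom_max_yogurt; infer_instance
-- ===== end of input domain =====

-- B replaces A's day-by-day list-rebuilding simulation by one left-to-right pass
-- with a day counter and per-day slot count; Pre_ restricts to 0 ≤ k, the natural
-- domain of a per-day capacity.


-- ===== PORT A =====
-- helper: Python day_pass — decrement each value, keep those still positive
def day_pass (value_in : List Int) : List Int :=
  match value_in with
  | [] => []
  | data :: rest =>
    if data - 1 > 0 then (data - 1) :: day_pass rest else day_pass rest

-- termination measure for A's while loop (length + total positive value)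
def pvMeas : List Int → Nat
  | [] => 0
  | v :: r => 1 + v.toNat + pvMeas r

theorem pvMeas_day_pass (M : List Int) : pvMeas (day_pass M) + M.length ≤ pvMeas M := by
  induction M with
  | nil => simp [day_pass, pvMeas]
  | cons v r ih =>
    simp only [day_pass, pvMeas, List.length_cons]
    split_ifs with h
    · simp only [pvMeas]; omega
    · omega

theorem pvMeas_drop (m : Nat) (L : List Int) : pvMeas (L.drop m) ≤ pvMeas L := by
  induction L generalizing m with
  | nil => simp
  | cons v r ih =>
    cases m with
    | zero => simp
    | succ m => simpa [pvMeas] using Nat.le_trans (ih m) (by simp [pvMeas])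

theorem pvMeas_step (L : List Int) (t : Int) (h : 0 < L.length) :
    pvMeas (day_pass (PySem.List.slice L (some t) none)) < pvMeas L := by
  rw [PySem.List.slice_some_none]
  have hL : 1 ≤ pvMeas L := by cases L with
    | nil => simp at h
    | cons v r => simp [pvMeas]; omega
  have h1 := pvMeas_day_pass (L.drop (PySem.List.clampIdx L.length t))
  have h2 := pvMeas_drop (PySem.List.clampIdx L.length t) L
  cases hn : L.drop (PySem.List.clampIdx L.length t) with
  | nil => simp [day_pass, pvMeas]; omega
  | cons v r =>
    rw [hn] at h2
    have h1' := pvMeas_day_pass (v :: r)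
    simp only [List.length_cons] at h1'
    omega

-- A's while loop: state = (current list, cons_num)
def aLoop (k : Int) (value_n : List Int) (cons_num : Int) : Int :=
  if h : 0 < value_n.length then
    let num_temp := min k (value_n.length : Int)
    aLoop k (day_pass (PySem.List.slice value_n (some num_temp) none)) (cons_num + num_temp)
  else cons_num
termination_by pvMeas value_n
decreasing_by exact pvMeas_step value_n _ h

def max_yogurt (n : Int) (k : Int) (value_n : List Int) : Int :=
  aLoop k value_n 0

-- ===== PORT B =====
-- B's for loop: state = (cons, day, filled)
def altLoop (k : Int) (items : List Int) (cons day filled : Int) : Int :=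
  match items with
  | [] => cons
  | v :: rest =>
    if day == 0 || v > day then
      if filled + 1 == k then altLoop k rest (cons + 1) (day + 1) 0
      else altLoop k rest (cons + 1) day (filled + 1)
    else altLoop k rest cons day filled

def max_yogurt_alt (n : Int) (k : Int) (value_n : List Int) : Int :=
  if k ≤ 0 then 0
  else altLoop k value_n 0 0 0

-- ===== PRECONDITION & SPEC =====
-- Pre_ excludes k < 0, outside the natural domain of a per-day capacity: there A's
-- negative num_temp makes 'value_n[num_temp:]' wrap around and A returns an accidental
-- negative total, while B naturally returns 0.
def Pre_max_yogurt (n : Int) (k : Int) (value_n : List Int) : Prop := 0 ≤ k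
instance (n : Int) (k : Int) (value_n : List Int) : Decidable (Pre_max_yogurt n k value_n) := by unfold Pre_max_yogurt; infer_instance
def pvWitness_max_yogurt : Int × Int × List Int := (5, 2, [1, 3, 1, 0, 4, 2, 5])
def Spec_max_yogurt (n : Int) (k : Int) (value_n : List Int) (out : Int) : Prop := out = max_yogurt_alt n k value_n
instance (n : Int) (k : Int) (value_n : List Int) (out : Int) : Decidable (Spec_max_yogurt n k value_n out) := by unfold Spec_max_yogurt; infer_instance

-- ===== CLAIM (what is proved, stated in full; the proofs are below) =====
def Claim_equal_max_yogurt : Prop := ∀ (n : Int) (k : Int) (value_n : List Int), Dom_max_yogurt n k value_n → Pre_max_yogurt n k value_n → Spec_max_yogurt n k value_n (max_yogurt n k value_n)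

-- ===== LEMMAS AND PROOFS =====

-- cons is a pure accumulator of altLoop
theorem altLoop_cons (k : Int) (L : List Int) (c d f : Int) :
    altLoop k L c d f = c + altLoop k L 0 d f := by
  induction L generalizing c d f with
  | nil => simp [altLoop]
  | cons v r ih =>
    simp only [altLoop]
    split_ifs with h1 h2
    · rw [ih (c + 1), ih (0 + 1)]; ring
    · rw [ih (c + 1), ih (0 + 1)]; ring
    · exact ih c d f

-- shift lemma: running B on the decremented-and-filtered list at day d is running
-- B on the original list at day d + 1 (for d ≥ 0)
theorem altLoop_shift (k : Int) (M : List Int) (c d f : Int) (hd : 0 ≤ d) :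
    altLoop k (day_pass M) c d f = altLoop k M c (d + 1) f := by
  induction M generalizing c d f with
  | nil => simp [day_pass, altLoop]
  | cons v r ih =>
    simp only [day_pass]
    split_ifs with h
    · have hc : ((d == 0 || v - 1 > d) : Bool) = ((d + 1 == 0 || v > d + 1) : Bool) := by
        rw [Bool.eq_iff_iff]
        simp only [Bool.or_eq_true, beq_iff_eq, decide_eq_true_eq]
        omega
      simp only [altLoop, hc]
      split_ifs with h1 h2
      · exact ih (c + 1) (d + 1) 0 (by omega)
      · exact ih (c + 1) d (f + 1) hd
      · exact ih c d f hd
    · have hc : ((d + 1 == 0 || v > d + 1) : Bool) = false := by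
        simp only [Bool.or_eq_false_iff, beq_eq_false_iff_ne, ne_eq, decide_eq_false_iff_not]
        omega
      rw [ih c d f hd]
      conv_rhs => rw [altLoop]
      rw [hc]
      simp
  
-- day-0 drain: with remaining capacity k - f, B eats min (k - f) |L| items and then
-- continues at day 1 with the rest
theorem altLoop_day0 (k : Int) (L : List Int) (c f : Int) (hf : 0 ≤ f) (hfk : f < k) :
    altLoop k L c 0 f =
      c + min (k - f) (L.length : Int) +
        altLoop k (L.drop (min (k - f) (L.length : Int)).toNat) 0 1 0 := by
  induction L generalizing c f with
  | nil => simp [altLoop]; omega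
  | cons v r ih =>
    have hcond : ((0 == (0:Int) || v > 0) : Bool) = true := by simp
    conv_lhs => rw [altLoop]
    rw [hcond]
    simp only [if_true]
    by_cases hk : f + 1 = k
    · have h1 : (f + 1 == k) = true := by simpa using hk
      rw [h1]
      simp only [if_true]
      have hmin : min (k - f) ((v :: r).length : Int) = 1 := by
        simp only [List.length_cons]; push_cast; omega
      rw [hmin, altLoop_cons]
      simp
    · have h1 : (f + 1 == k) = false := by simpa using hk
      rw [h1]
      simp only [if_false, Bool.false_eq_true]
      rw [ih (c + 1) (f + 1) (by omega) (by omega)]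
      have hmin : min (k - f) ((v :: r).length : Int) = 1 + min (k - (f + 1)) (r.length : Int) := by
        simp only [List.length_cons]; push_cast; omega
      have hdrop : (v :: r).drop (min (k - f) ((v :: r).length : Int)).toNat
          = r.drop (min (k - (f + 1)) (r.length : Int)).toNat := by
        rw [hmin]
        have : (1 + min (k - (f + 1)) (r.length : Int)).toNat
            = 1 + (min (k - (f + 1)) (r.length : Int)).toNat := by omega
        rw [this, Nat.add_comm, List.drop_succ_cons]
      rw [hdrop, hmin]
      ring

-- k = 0: A's loop adds min 0 |L| = 0 each round and only shrinks the list
theorem aLoop_zero (m : Nat) : ∀ L c, pvMeas L ≤ m → aLoop 0 L c = c := by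
  induction m with
  | zero =>
    intro L c h
    cases L with
    | nil => rw [aLoop]; simp
    | cons v r => simp [pvMeas] at h
  | succ m ih =>
    intro L c h
    rw [aLoop]
    split_ifs with hl
    · have hmin : min (0:Int) ((L.length : Nat) : Int) = 0 := by
        have : (0:Int) ≤ (L.length : Int) := by positivity
        omega
      have hstep := pvMeas_step L (min 0 ((L.length : Nat) : Int)) hl
      rw [hmin] at *
      have := ih (day_pass (PySem.List.slice L (some 0) none)) (c + 0) (by omega)
      simpa using this
    · rfl

-- main equivalence for 1 ≤ k, by induction on the termination measure
theorem main_pos (k : Int) (hk : 1 ≤ k) (m : Nat) :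
    ∀ L c, pvMeas L ≤ m → aLoop k L c = altLoop k L c 0 0 := by
  induction m with
  | zero =>
    intro L c h
    cases L with
    | nil => rw [aLoop]; simp [altLoop]
    | cons v r => simp [pvMeas] at h
  | succ m ih =>
    intro L c h
    rw [aLoop]
    split_ifs with hl
    · have hnum0 : (0:Int) ≤ min k ((L.length : Nat) : Int) := by
        have : (0:Int) ≤ (L.length : Int) := by positivity
        omega
      have hstep := pvMeas_step L (min k ((L.length : Nat) : Int)) hl
      rw [ih _ _ (by omega)]
      rw [PySem.List.slice_from _ hnum0]
      rw [altLoop_shift k _ _ 0 0 (by omega)]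
      rw [altLoop_day0 k L c 0 (by omega) (by omega)]
      rw [altLoop_cons]
      simp
    · cases L with
      | nil => simp [altLoop]
      | cons v r => simp at hl

-- ===== VERDICT (by name: the statement is the Claim_ definition above) =====
theorem max_yogurt_spec : Claim_equal_max_yogurt := by
  intro n k value_n _ hpre
  unfold Spec_max_yogurt max_yogurt max_yogurt_alt
  unfold Pre_max_yogurt at hpre
  by_cases hk : k ≤ 0
  · have hk0 : k = 0 := le_antisymm hk hpre
    rw [if_pos hk, hk0]
    exact aLoop_zero (pvMeas value_n) value_n 0 le_rfl
  · rw [if_neg hk]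
    exact main_pos k (by omega) (pvMeas value_n) value_n 0 le_rfl
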